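-- pv_equiv track=rewrite | github.com/JovianHQ/jovian-py | jovian/utils/envfile.py | extract_package_from_line
-- ===== SOURCE A (Python) =====
-- def extract_package_from_line(line, packages):
--     """Extract the name of a package from an error line"""
--     for p in packages:
--         if p in line.strip():
--             return p
--     """if exact version not found in string, look just for package name"""
--     for p in packages:
--         if '=' in p and p.split('=')[0] in line.strip():
--             return p
--     return None
-- ===== SOURCE B (Python) =====
-- def extract_package_from_line(line, packages):
--     """Extract the name of a package from an error line (single pass with a
--     first-name-match fallback; a later full match still outranks it)."""
--     s = line.strip()
--     fallback = None
--     for p in packages: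
--         if p in s:
--             return p
--         if fallback is None and '=' in p and p.split('=')[0] in s:
--             fallback = p
--     return fallback
-- ===== Notes on version B (the rewrite author's own statement) =====
-- stated objective: simpler
-- what changed: Replaces A's two ordered passes over packages (full-string match, then name-part match) by one pass carrying a first-name-match fallback accumulator, stripping the line once instead of per iteration.
import Mathlib
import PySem

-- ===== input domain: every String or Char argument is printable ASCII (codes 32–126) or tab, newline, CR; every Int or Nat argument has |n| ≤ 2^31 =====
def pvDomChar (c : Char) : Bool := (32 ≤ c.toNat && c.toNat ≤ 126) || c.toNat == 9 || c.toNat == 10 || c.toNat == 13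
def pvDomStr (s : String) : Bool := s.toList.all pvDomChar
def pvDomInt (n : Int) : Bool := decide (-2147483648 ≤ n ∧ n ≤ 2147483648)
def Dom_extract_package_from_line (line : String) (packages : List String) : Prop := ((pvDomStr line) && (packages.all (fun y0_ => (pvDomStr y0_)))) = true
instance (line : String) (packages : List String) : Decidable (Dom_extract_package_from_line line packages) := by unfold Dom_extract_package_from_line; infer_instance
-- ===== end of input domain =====

-- B folds A's two ordered passes into one pass with a first-name-match fallback accumulator (objective: simpler).

-- ===== PORT A =====
-- 'p.split("=")[0]' : split with nonempty sep always yields ≥ 1 piece, so [0] is headD ""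
def pvNameCond (line : String) (p : String) : Bool :=
  PySem.Str.isIn "=" p && PySem.Str.isIn (((PySem.Str.split? p "=").getD []).headD "") (PySem.Str.strip line)

def extract_package_from_line (line : String) (packages : List String) : Option String :=
  match packages.find? (fun p => PySem.Str.isIn p (PySem.Str.strip line)) with
  | some p => some p
  | none => packages.find? (fun p => pvNameCond line p)

-- ===== PORT B =====
def pvLoopB (s : String) (fallback : Option String) : List String → Option String
  | [] => fallback
  | p :: rest =>
    if PySem.Str.isIn p s then some p
    else if fallback.isNone && PySem.Str.isIn "=" p
            && PySem.Str.isIn (((PySem.Str.split? p "=").getD []).headD "") s then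
      pvLoopB s (some p) rest
    else
      pvLoopB s fallback rest

def extract_package_from_line_alt (line : String) (packages : List String) : Option String :=
  pvLoopB (PySem.Str.strip line) none packages

-- ===== PRECONDITION & SPEC =====
def Spec_extract_package_from_line (line : String) (packages : List String) (out : Option String) : Prop := out = extract_package_from_line_alt line packages
instance (line : String) (packages : List String) (out : Option String) : Decidable (Spec_extract_package_from_line line packages out) := by unfold Spec_extract_package_from_line; infer_instance

-- ===== CLAIM (what is proved, stated in full; the proofs are below) =====
def Claim_equal_extract_package_from_line : Prop := ∀ (line : String) (packages : List String), Dom_extract_package_from_line line packages → Spec_extract_package_from_line line packages (extract_package_from_line line packages)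

-- ===== LEMMAS AND PROOFS =====
-- Characterisation of B's loop: full-string match wins, otherwise the recorded
-- fallback, otherwise the first name-part match of the remaining list.
theorem pvLoopB_eq (line : String) (fb : Option String) (l : List String) :
    pvLoopB (PySem.Str.strip line) fb l =
      match l.find? (fun p => PySem.Str.isIn p (PySem.Str.strip line)) with
      | some p => some p
      | none => fb.orElse (fun _ => l.find? (fun p => pvNameCond line p)) := by
  induction l generalizing fb with
  | nil => cases fb <;> simp [pvLoopB, Option.orElse]
  | cons p rest ih =>
    by_cases hfull : PySem.Chars.isIn p.toList (PySem.Chars.strip line.toList) = true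
    · simp [pvLoopB, hfull]
    · by_cases hname : (PySem.Chars.isIn ['='] p.toList = true ∧
          PySem.Chars.isIn (((PySem.Str.split? p "=").getD []).head?.getD "").toList
            (PySem.Chars.strip line.toList) = true) <;>
        cases fb <;>
        cases hf : List.find? (fun q => PySem.Chars.isIn q.toList (PySem.Chars.strip line.toList)) rest <;>
        simp_all [pvLoopB, pvNameCond, Option.orElse] <;>
        (have hf0 : List.find? (fun q => PySem.Chars.isIn q.toList (PySem.Chars.strip line.toList)) rest = none :=
            List.find?_eq_none.mpr (by intro x hx; simp [hf x hx]);
         simp [hf0]) <;>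
        (intro h1 h2; simp [hname h1] at h2)

-- ===== VERDICT (by name: the statement is the Claim_ definition above) =====
theorem extract_package_from_line_spec : Claim_equal_extract_package_from_line := by
  intro line packages _
  unfold Spec_extract_package_from_line extract_package_from_line extract_package_from_line_alt
  rw [pvLoopB_eq]
  cases packages.find? (fun p => PySem.Str.isIn p (PySem.Str.strip line)) <;>
    simp [Option.orElse]
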